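-- pv_equiv track=rewrite | github.com/philangist/Threes | matrix.py | shift_if_possible
-- ===== SOURCE A (Python) =====
-- EMPTY = 0
--
-- class RecentItems(object):
--     def __init__(self):
--         self.seen = [EMPTY, EMPTY]
--         self.fixed_translate = False
--
--     @property
--     def just_seen(self):
--         return self.seen[0]
--
--     @just_seen.setter
--     def just_seen(self, val):
--         self.seen[0] = val
--
--     @property
--     def previously_seen(self):
--         return self.seen[1]
--
--     @previously_seen.setter
--     def previously_seen(self, val):
--         self.seen[1] = val
--
--     def should_collapse(self):
--         if (self.just_seen == EMPTY and self.previously_seen == EMPTY):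
--             return False
--
--         if (self.just_seen == 1 and self.previously_seen == 1):
--             return False
--
--         if (
--             (self.just_seen == 1 and self.previously_seen == 2) or
--             (self.just_seen == 2 and self.previously_seen == 1)
--         ):
--             return True
--
--         if self.just_seen == self.previously_seen:
--             return True
--         return False
--
--     def should_shift(self):
--         if (self.just_seen == EMPTY and self.previously_seen == EMPTY):
--             if not self.fixed_translate:
--                 self.fixed_translate = True
--                 return True
--
--         if self.just_seen != EMPTY:
--             self.fixed_translate = True
--             if self.previously_seen == EMPTY:
--                 return True
--
--         return False
--
--     def flush(self):
--         self.seen = [EMPTY, EMPTY]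
--
--     def partial_flush(self):
--         self.previously_seen = EMPTY
--
--     def push(self, value):
--         self.seen = ([value] + self.seen)[:2]
--
-- def shift_if_possible(values):
--     final = []
--     recent_items = RecentItems()
--     for item in values:
--         item = item or EMPTY
--         recent_items.push(item)
--         if recent_items.should_shift():
--             final = final[:-1]
--             recent_items.partial_flush()
--         final.append(item)
--     return final
-- ===== SOURCE B (Python) =====
-- def shift_if_possible(values):
--     # A zero that is immediately followed by a nonzero gets collapsed away;
--     # everything else is kept in order.
--     vals = [v or 0 for v in values]
--     return [cur for cur, nxt in zip(vals, vals[1:] + [0]) if not (cur == 0 and nxt != 0)]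
-- ===== Notes on version B (the rewrite author's own statement) =====
-- stated objective: simpler
-- what changed: Replaced the stateful RecentItems push/should_shift/partial_flush machine with append-then-pop by a single look-ahead filter that drops exactly the zeros immediately followed by a nonzero.
import Mathlib
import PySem

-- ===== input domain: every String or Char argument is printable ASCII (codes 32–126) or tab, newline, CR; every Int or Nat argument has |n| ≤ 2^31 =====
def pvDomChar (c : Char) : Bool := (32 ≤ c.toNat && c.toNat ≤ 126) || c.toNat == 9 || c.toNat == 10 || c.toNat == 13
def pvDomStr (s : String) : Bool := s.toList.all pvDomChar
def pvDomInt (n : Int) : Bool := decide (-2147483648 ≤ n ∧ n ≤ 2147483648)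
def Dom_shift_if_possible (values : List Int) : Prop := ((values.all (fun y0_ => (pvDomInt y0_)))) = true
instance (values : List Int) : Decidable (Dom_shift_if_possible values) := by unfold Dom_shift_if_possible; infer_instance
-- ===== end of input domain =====

-- B replaces A's stateful RecentItems machine (append then pop) by a single look-ahead
-- filter dropping each zero immediately followed by a nonzero; objective: simpler.

-- ===== PORT A =====
-- the RecentItems class: seen is the 2-element list, methods transliterated
structure RecentItems where
  seen : List Int
  fixed_translate : Bool
deriving Repr, DecidableEq

def RecentItems.just_seen (r : RecentItems) : Int := r.seen.getD 0 0

def RecentItems.previously_seen (r : RecentItems) : Int := r.seen.getD 1 0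

def RecentItems.push (r : RecentItems) (v : Int) : RecentItems :=
  { r with seen := ([v] ++ r.seen).take 2 }

-- mutates fixed_translate, so it returns the Bool together with the updated object
def RecentItems.should_shift (r : RecentItems) : Bool × RecentItems :=
  if r.just_seen = 0 ∧ r.previously_seen = 0 then
    if ¬ r.fixed_translate then (true, { r with fixed_translate := true })
    else (false, r)          -- falls through: just_seen = 0, so the second if is false
  else if r.just_seen ≠ 0 then
    if r.previously_seen = 0 then (true, { r with fixed_translate := true })
    else (false, { r with fixed_translate := true })
  else (false, r)

def RecentItems.partial_flush (r : RecentItems) : RecentItems :=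
  { r with seen := r.seen.set 1 0 }

-- the body of A's for-loop
def pvStepA (st : List Int × RecentItems) (item : Int) : List Int × RecentItems :=
  let item := if item = 0 then (0 : Int) else item   -- item or EMPTY
  let r := st.2.push item
  let (sh, r) := r.should_shift
  let (final, r) := if sh then (st.1.dropLast, r.partial_flush) else (st.1, r)
  (final ++ [item], r)

def shift_if_possible (values : List Int) : List Int :=
  (values.foldl pvStepA ([], ⟨[0, 0], false⟩)).1

-- ===== PORT B =====
def shift_if_possible_alt (values : List Int) : List Int :=
  let vals := values.map (fun v => if v = 0 then (0 : Int) else v)   -- v or 0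
  ((vals.zip ((vals.drop 1) ++ [0])).filter
      (fun p => !(p.1 == 0 && p.2 != 0))).map Prod.fst

-- ===== PRECONDITION & SPEC =====
def Spec_shift_if_possible (values : List Int) (out : List Int) : Prop := out = shift_if_possible_alt values
instance (values : List Int) (out : List Int) : Decidable (Spec_shift_if_possible values out) := by unfold Spec_shift_if_possible; infer_instance

-- ===== CLAIM (what is proved, stated in full; the proofs are below) =====
def Claim_equal_shift_if_possible : Prop := ∀ (values : List Int), Dom_shift_if_possible values → Spec_shift_if_possible values (shift_if_possible values)

-- ===== LEMMAS AND PROOFS =====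

-- `v or 0` is the identity on Int
theorem or_zero_id (v : Int) : (if v = 0 then (0 : Int) else v) = v := by
  split <;> simp_all

theorem map_or_zero_id (l : List Int) : l.map (fun v => if v = 0 then (0 : Int) else v) = l := by
  simp [or_zero_id]

-- recursive look-ahead form of B's filter
def la : List Int → List Int
  | [] => []
  | [x] => [x]
  | x :: y :: rs => if x = 0 ∧ y ≠ 0 then la (y :: rs) else x :: la (y :: rs)

theorem alt_eq_la (l : List Int) :
    ((l.zip ((l.drop 1) ++ [0])).filter (fun p => !(p.1 == 0 && p.2 != 0))).map Prod.fst
      = la l := by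
  induction l with
  | nil => simp [la]
  | cons x t ih =>
    cases t with
    | nil => simp [la]
    | cons y rs =>
      rw [la]
      by_cases h : x = 0 ∧ y ≠ 0
      · rw [if_pos h]
        simp only [List.drop, List.cons_append, List.zip_cons_cons, List.filter_cons]
        have : (!(x == 0 && (y != 0))) = false := by
          simp [h.1]; exact h.2
        rw [this]
        simpa using ih
      · rw [if_neg h]
        simp only [List.drop, List.cons_append, List.zip_cons_cons, List.filter_cons]
        have : (!(x == 0 && (y != 0))) = true := by
          simp only [Bool.not_eq_eq_eq_not, Bool.not_true, Bool.and_eq_false_iff]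
          rcases Decidable.not_and_iff_or_not.mp h with h1 | h1
          · left; simpa using h1
          · right; simpa using h1
        rw [if_pos this]
        simpa using ih

-- one step of A's fold, once fixed_translate is true
theorem step_true (acc : List Int) (prev ps x : Int) :
    pvStepA (acc ++ [prev], ⟨[prev, ps], true⟩) x
    = if x ≠ 0 ∧ prev = 0 then (acc ++ [x], ⟨[x, 0], true⟩)
      else ((acc ++ [prev]) ++ [x], ⟨[x, prev], true⟩) := by
  unfold pvStepA
  rw [or_zero_id]
  by_cases hx : x = 0 <;> by_cases hp : prev = 0 <;>
    simp [RecentItems.push, RecentItems.should_shift, RecentItems.partial_flush,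
      RecentItems.just_seen, RecentItems.previously_seen, hx, hp, List.set]

-- the first step always shifts (a no-op pop) and sets fixed_translate
theorem step_first (v : Int) :
    pvStepA ([], ⟨[0, 0], false⟩) v = ([v], ⟨[v, 0], true⟩) := by
  unfold pvStepA
  rw [or_zero_id]
  by_cases hv : v = 0 <;>
    simp [RecentItems.push, RecentItems.should_shift, RecentItems.partial_flush,
      RecentItems.just_seen, RecentItems.previously_seen, hv, List.set]

-- invariant for the tail of the fold (fixed_translate already true)
theorem fold_la (rest : List Int) : ∀ (acc : List Int) (prev ps : Int),
    (rest.foldl pvStepA (acc ++ [prev], ⟨[prev, ps], true⟩)).1 = acc ++ la (prev :: rest) := by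
  induction rest with
  | nil => intro acc prev ps; simp [la]
  | cons x rs ih =>
    intro acc prev ps
    rw [List.foldl_cons, step_true]
    by_cases h : x ≠ 0 ∧ prev = 0
    · rw [if_pos h, ih, la, if_pos ⟨h.2, h.1⟩]
    · rw [if_neg h, ih, la, if_neg (by tauto), List.append_assoc, List.singleton_append]

-- ===== VERDICT (by name: the statement is the Claim_ definition above) =====
theorem shift_if_possible_spec : Claim_equal_shift_if_possible := by
  intro values _
  unfold Spec_shift_if_possible shift_if_possible shift_if_possible_alt
  rw [map_or_zero_id, alt_eq_la]
  cases values with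
  | nil => simp [la]
  | cons v rest =>
    rw [List.foldl_cons, step_first]
    have := fold_la rest [] v 0
    simpa using this
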